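-- pv_equiv track=rewrite | github.com/finkn/InPUTpy | inputpy/util.py | findAbsoluteParameter
-- ===== SOURCE A (Python) =====
-- def absolute(parentId, paramId):
--     """
--     Return the absolute parameter ID of the parameter relative to the
--     parent. If the parent is None or empty (''), then the parameter ID
--     is already absolute and is simply returned.
--     """
--     if parentId is None or parentId == '':
--         return paramId
--     else:
--         return parentId + '.' + paramId
--
-- def parent(paramId):
--     """
--     Return the parent ID, or None if the parameter is already at the root.
--     This function basically does a '$ cd ..'.
--     """
--     index = paramId.rfind('.')
--     if index == -1:
--         return None
--     else:
--         return paramId[:index]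
--
-- def findAbsoluteParameter(contextId, paramId, ids):
--     """
--     Return the absolute name of a parameter, relative to a context.
--     The contextId parameter specifies a scope by naming a parameter
--     relative to which some other parameter might be located.
--     The scope is expanded more and more until the absolute path matches
--     one of the given valid IDs.
--
--     The contextId is always absolute. IDs in the ids collection are
--     always absolute. The paramId may be absolute or relative.
--     """
--     param = absolute(contextId, paramId)
--
--     if param in ids:
--         return param
--     elif contextId is None:
--         return None
--     else:
--         contextId = parent(contextId)
--         return findAbsoluteParameter(contextId, paramId, ids)
-- ===== SOURCE B (Python) =====
-- def absolute(parentId, paramId):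
--     if parentId is None or parentId == '':
--         return paramId
--     else:
--         return parentId + '.' + paramId
--
--
-- def findAbsoluteParameter(contextId, paramId, ids):
--     # Precompute every scope in one pass over contextId's dot positions,
--     # then scan the resulting candidate list once for the first valid ID.
--     candidates = []
--     if contextId is not None:
--         dots = [i for i, ch in enumerate(contextId) if ch == '.']
--         contexts = [contextId] + [contextId[:i] for i in reversed(dots)]
--         candidates = [absolute(c, paramId) for c in contexts]
--     candidates.append(paramId)
--     for cand in candidates:
--         if cand in ids:
--             return cand
--     return None
-- ===== Notes on version B (the rewrite author's own statement) =====
-- stated objective: alternative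
-- what changed: A widens the scope by recursing with parent() and re-testing one candidate per call; B precomputes the dot positions of contextId in one pass, materialises the whole candidate list (every widened scope made absolute, then the bare paramId) and scans it once for the first valid ID.
import Mathlib
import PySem

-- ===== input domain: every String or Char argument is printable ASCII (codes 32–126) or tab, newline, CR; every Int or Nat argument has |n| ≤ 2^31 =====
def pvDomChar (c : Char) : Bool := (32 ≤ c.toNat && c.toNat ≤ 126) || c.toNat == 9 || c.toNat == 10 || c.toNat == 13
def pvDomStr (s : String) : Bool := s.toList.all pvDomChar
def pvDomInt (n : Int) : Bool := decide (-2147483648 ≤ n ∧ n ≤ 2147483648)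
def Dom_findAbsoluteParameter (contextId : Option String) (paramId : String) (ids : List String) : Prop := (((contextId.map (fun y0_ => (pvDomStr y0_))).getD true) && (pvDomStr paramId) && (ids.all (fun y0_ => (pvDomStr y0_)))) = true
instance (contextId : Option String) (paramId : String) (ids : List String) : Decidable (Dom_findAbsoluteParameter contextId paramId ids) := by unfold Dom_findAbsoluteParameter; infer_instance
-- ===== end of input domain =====

-- B replaces A's widen-scope recursion by precomputing all candidate scopes from the
-- dot positions of contextId in one pass and scanning that candidate list once (objective: alternative).

-- ===== PORT A =====

-- absolute(parentId, paramId); string concatenation done on List Char (exact; Lean's String.append is kernel-opaque)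
def pyAbsolute (parentId : Option String) (paramId : String) : String :=
  match parentId with
  | none => paramId
  | some s => if s = "" then paramId else String.ofList (s.toList ++ '.' :: paramId.toList)

-- parent(paramId): paramId[:index] via PySem.List.slice on the char list (exact)
def pyParent (paramId : String) : Option String :=
  let index := PySem.Str.rfind paramId "."
  if index = -1 then none
  else some (String.ofList (PySem.List.slice paramId.toList none (some index)))

-- ['.'] is a prefix of l iff l starts with '.' (termination helper for the port)
theorem dotPrefix_iff (l : List Char) : ['.'].isPrefixOf l = true ↔ l[0]? = some '.' := by
  cases l with
  | nil => simp [List.isPrefixOf]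
  | cons c t =>
    have ht : ([] : List Char).isPrefixOf t = true := by cases t <;> rfl
    show (('.' == c) && List.isPrefixOf [] t) = true ↔ some c = some '.'
    rw [ht, Bool.and_true, beq_iff_eq, Option.some.injEq]
    exact eq_comm

-- full characterisation of rfind.go on the single-char pattern ['.'] (the port's termination cites it)
theorem rfind_go_spec (s : List Char) (j : Nat) :
    (PySem.Chars.rfind.go s ['.'] j = -1 ∧ ∀ k, k ≤ j → s[k]? ≠ some '.') ∨
    (∃ i : Nat, PySem.Chars.rfind.go s ['.'] j = (i : Int) ∧ i ≤ j ∧ s[i]? = some '.' ∧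
      ∀ k, i < k → k ≤ j → s[k]? ≠ some '.') := by
  induction j with
  | zero =>
    have e : PySem.Chars.rfind.go s ['.'] 0 = if ['.'].isPrefixOf s = true then 0 else -1 := rfl
    by_cases h : s[0]? = some '.'
    · right
      exact ⟨0, by rw [e, if_pos ((dotPrefix_iff s).mpr h)]; simp, le_refl 0, h,
        fun k h1 h2 => absurd h1 (by omega)⟩
    · left
      refine ⟨by rw [e, if_neg (by rw [dotPrefix_iff]; exact h)], ?_⟩
      intro k hk
      have : k = 0 := Nat.le_zero.mp hk
      rw [this]; exact h
  | succ j ih =>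
    have e : PySem.Chars.rfind.go s ['.'] (j+1)
        = if ['.'].isPrefixOf (s.drop (j+1)) = true then ((j+1 : Nat) : Int)
          else PySem.Chars.rfind.go s ['.'] j := rfl
    have hcond : ['.'].isPrefixOf (s.drop (j+1)) = true ↔ s[j+1]? = some '.' := by
      rw [dotPrefix_iff, List.getElem?_drop]
    by_cases h : s[j+1]? = some '.'
    · right
      exact ⟨j+1, by rw [e, if_pos (hcond.mpr h)], le_refl _, h, by omega⟩
    · have hgo : PySem.Chars.rfind.go s ['.'] (j+1) = PySem.Chars.rfind.go s ['.'] j := by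
        rw [e, if_neg (by rw [hcond]; exact h)]
      rcases ih with ⟨h1, h2⟩ | ⟨i, h1, h2, h3, h4⟩
      · left
        refine ⟨by rw [hgo]; exact h1, ?_⟩
        intro k hk
        rcases Nat.lt_or_ge k (j+1) with hk' | hk'
        · exact h2 k (by omega)
        · have : k = j + 1 := by omega
          simpa [this] using h
      · right
        refine ⟨i, by rw [hgo]; exact h1, by omega, h3, ?_⟩
        intro k hik hk
        rcases Nat.lt_or_ge k (j+1) with hk' | hk'
        · exact h4 k hik (by omega)
        · have : k = j + 1 := by omega
          simpa [this] using h

-- measure used by the port's well-founded recursion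
def ctxMeasure : Option String → Nat
  | none => 0
  | some s => s.toList.length + 1

theorem rfind_dot (s : String) :
    PySem.Str.rfind s "." = PySem.Chars.rfind.go s.toList ['.'] s.toList.length := by
  have hdot : ".".toList = ['.'] := by simp
  rw [PySem.Str.rfind_eq, hdot]; rfl

theorem pyParent_none (s : String)
    (h : PySem.Chars.rfind.go s.toList ['.'] s.toList.length = -1) : pyParent s = none := by
  unfold pyParent
  rw [rfind_dot, h]
  simp

theorem pyParent_some (s : String) (i : Nat) (_hi : i < s.toList.length)
    (h : PySem.Chars.rfind.go s.toList ['.'] s.toList.length = (i : Int)) :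
    pyParent s = some (String.ofList (s.toList.take i)) := by
  unfold pyParent
  rw [rfind_dot, h]
  rw [if_neg (by omega)]
  rw [PySem.List.slice_to s.toList (by omega : (0:Int) ≤ ((i : Nat) : Int))]
  simp

theorem getElem?_dot_lt (s : List Char) (i : Nat) (h3 : s[i]? = some '.') : i < s.length := by
  by_contra hge
  rw [List.getElem?_eq_none (by omega)] at h3
  simp at h3

theorem pyParent_measure (s : String) : ctxMeasure (pyParent s) < s.toList.length + 1 := by
  rcases rfind_go_spec s.toList s.toList.length with ⟨h1, _⟩ | ⟨i, h1, _, h3, _⟩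
  · rw [pyParent_none s h1]; simp [ctxMeasure]
  · have hilt : i < s.toList.length := getElem?_dot_lt _ _ h3
    rw [pyParent_some s i hilt h1]
    simp only [ctxMeasure, String.toList_ofList, List.length_take]
    rw [min_eq_left hilt.le]
    omega

-- findAbsoluteParameter(contextId, paramId, ids), A's recursion verbatim
def findAbsoluteParameter (contextId : Option String) (paramId : String) (ids : List String) : Option String :=
  let param := pyAbsolute contextId paramId
  if param ∈ ids then some param
  else
    match contextId with
    | none => none
    | some s => findAbsoluteParameter (pyParent s) paramId ids
termination_by ctxMeasure contextId
decreasing_by simpa [ctxMeasure] using pyParent_measure s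

-- ===== PORT B =====

-- absolute(c, paramId) on char lists (B calls the same helper; '' check is the [] check)
def altAbsolute (c p : List Char) : List Char :=
  if c = [] then p else c ++ '.' :: p

-- dots = [i for i, ch in enumerate(contextId) if ch == '.']
def dotPositions (cs : List Char) : List Int :=
  (PySem.List.enumerate cs).filterMap (fun ic => if ic.2 = '.' then some ic.1 else none)

-- candidates: every widened scope made absolute, then the bare paramId
def candidatesOf (contextId : Option String) (p : List Char) : List (List Char) :=
  (match contextId with
   | none => []
   | some s =>
     (s.toList :: (dotPositions s.toList).reverse.map (fun i => s.toList.take i.toNat)).map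
       (fun c => altAbsolute c p))
  ++ [p]

-- the final scan: first candidate that is in ids
def firstIn : List (List Char) → List String → Option String
  | [], _ => none
  | c :: rest, ids => if String.ofList c ∈ ids then some (String.ofList c) else firstIn rest ids

def findAbsoluteParameter_alt (contextId : Option String) (paramId : String) (ids : List String) : Option String :=
  firstIn (candidatesOf contextId paramId.toList) ids

-- ===== PRECONDITION & SPEC =====
def Spec_findAbsoluteParameter (contextId : Option String) (paramId : String) (ids : List String) (out : Option String) : Prop := out = findAbsoluteParameter_alt contextId paramId ids
instance (contextId : Option String) (paramId : String) (ids : List String) (out : Option String) : Decidable (Spec_findAbsoluteParameter contextId paramId ids out) := by unfold Spec_findAbsoluteParameter; infer_instance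

-- ===== CLAIM (what is proved, stated in full; the proofs are below) =====
def Claim_equal_findAbsoluteParameter : Prop := ∀ (contextId : Option String) (paramId : String) (ids : List String), Dom_findAbsoluteParameter contextId paramId ids → Spec_findAbsoluteParameter contextId paramId ids (findAbsoluteParameter contextId paramId ids)

-- ===== LEMMAS AND PROOFS =====

theorem dpos_append (u v : List Char) (n : Int) :
    (PySem.List.enumerate (u ++ v) n).filterMap (fun ic => if ic.2 = '.' then some ic.1 else none)
    = (PySem.List.enumerate u n).filterMap (fun ic => if ic.2 = '.' then some ic.1 else none)
      ++ (PySem.List.enumerate v (n + u.length)).filterMap (fun ic => if ic.2 = '.' then some ic.1 else none) := by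
  induction u generalizing n with
  | nil => simp [PySem.List.enumerate]
  | cons c t ih =>
    simp only [List.cons_append, PySem.List.enumerate, List.filterMap_cons, ih (n+1),
      List.length_cons]
    have : n + 1 + (t.length : Int) = n + ((t.length : Int) + 1) := by ring
    rw [this]
    push_cast
    split <;> simp

theorem dpos_no_dot (v : List Char) (n : Int) (h : '.' ∉ v) :
    (PySem.List.enumerate v n).filterMap (fun ic => if ic.2 = '.' then some ic.1 else none) = [] := by
  induction v generalizing n with
  | nil => simp [PySem.List.enumerate]
  | cons c t ih =>
    simp only [List.mem_cons, not_or] at h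
    simp [PySem.List.enumerate, Ne.symm h.1, ih _ h.2]

theorem dpos_mem (cs : List Char) (n j : Int)
    (hj : j ∈ (PySem.List.enumerate cs n).filterMap (fun ic => if ic.2 = '.' then some ic.1 else none)) :
    ∃ k : Nat, k < cs.length ∧ j = n + k := by
  induction cs generalizing n with
  | nil => simp [PySem.List.enumerate] at hj
  | cons c t ih =>
    simp only [PySem.List.enumerate, List.filterMap_cons] at hj
    by_cases hc : c = '.'
    · rw [if_pos hc] at hj
      rcases List.mem_cons.mp hj with h | h
      · exact ⟨0, by simp, by simpa using h⟩
      · rcases ih (n+1) h with ⟨k, hk1, hk2⟩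
        exact ⟨k+1, by simpa using hk1, by push_cast [hk2]; ring⟩
    · rw [if_neg hc] at hj
      rcases ih (n+1) hj with ⟨k, hk1, hk2⟩
      exact ⟨k+1, by simpa using hk1, by push_cast [hk2]; ring⟩

theorem pyAbsolute_eq (s : String) (p : String) :
    pyAbsolute (some s) p = String.ofList (altAbsolute s.toList p.toList) := by
  unfold pyAbsolute altAbsolute
  by_cases h : s = ""
  · simp [h]
  · have h' : s.toList ≠ [] := by simpa using h
    simp [h, h']

theorem A_none (paramId : String) (ids : List String) :
    findAbsoluteParameter none paramId ids = firstIn [paramId.toList] ids := by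
  rw [findAbsoluteParameter]
  simp [pyAbsolute, firstIn]

theorem dotPositions_nil (cs : List Char) (h : '.' ∉ cs) : dotPositions cs = [] := by
  unfold dotPositions
  exact dpos_no_dot cs 0 h

theorem dpos_decomp (cs : List Char) (i : Nat) (hi : i < cs.length)
    (hdot : cs[i]? = some '.') (hmax : ∀ k, i < k → k ≤ cs.length → cs[k]? ≠ some '.') :
    dotPositions cs = dotPositions (cs.take i) ++ [(i : Int)] := by
  have hgi : cs[i] = '.' := by
    rw [List.getElem?_eq_getElem hi] at hdot
    exact Option.some.inj hdot
  have hsplit : cs.take i ++ '.' :: cs.drop (i+1) = cs := by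
    conv_rhs => rw [← List.take_append_drop i cs]
    congr 1
    rw [← List.getElem_cons_drop (as := cs) (h := hi), hgi]
  have hw : '.' ∉ cs.drop (i+1) := by
    intro hm
    rcases List.getElem_of_mem hm with ⟨k, hk, hkeq⟩
    have hk' : (cs.drop (i+1))[k]? = some '.' := by rw [List.getElem?_eq_getElem hk, hkeq]
    rw [List.getElem?_drop] at hk'
    have hklen : k < cs.length - (i+1) := by simpa using hk
    exact hmax (i+1+k) (by omega) (by omega) hk'
  conv_lhs => rw [← hsplit]
  unfold dotPositions
  rw [dpos_append]
  congr 1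
  have hlen : ((cs.take i).length : Int) = (i : Int) := by
    simp [List.length_take, min_eq_left hi.le]
  rw [hlen]
  simp only [PySem.List.enumerate, List.filterMap_cons]
  rw [dpos_no_dot _ _ hw]
  simp

theorem cand_tail (cs : List Char) (p : List Char) (i : Nat) (hi : i < cs.length)
    (hdot : cs[i]? = some '.') (hmax : ∀ k, i < k → k ≤ cs.length → cs[k]? ≠ some '.') :
    candidatesOf (some (String.ofList (cs.take i))) p
      = ((dotPositions cs).reverse.map (fun j => cs.take j.toNat)).map
          (fun c => altAbsolute c p) ++ [p] := by
  unfold candidatesOf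
  simp only [String.toList_ofList]
  rw [dpos_decomp cs i hi hdot hmax]
  rw [List.reverse_append]
  simp only [List.reverse_singleton, List.singleton_append, List.map_cons, Int.toNat_natCast]
  congr 2
  refine congrArg (List.map fun c => altAbsolute c p) (List.map_congr_left ?_)
  intro j hj
  rcases dpos_mem (cs.take i) 0 j (List.mem_reverse.mp hj) with ⟨k, hk, hkeq⟩
  have hki : k < i := by
    have : (cs.take i).length = i := by simp [List.length_take, min_eq_left hi.le]
    omega
  have hj' : j.toNat = k := by omega
  rw [hj', List.take_take, min_eq_left hki.le]

theorem A_some_step (paramId : String) (ids : List String) (s : String)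
    (hrec : ∀ t : String, t.toList.length < s.toList.length →
      findAbsoluteParameter (some t) paramId ids
        = firstIn (candidatesOf (some t) paramId.toList) ids) :
    findAbsoluteParameter (some s) paramId ids
      = firstIn (candidatesOf (some s) paramId.toList) ids := by
  rw [findAbsoluteParameter]
  simp only [pyAbsolute_eq]
  by_cases hmem : String.ofList (altAbsolute s.toList paramId.toList) ∈ ids
  · simp [hmem, candidatesOf, firstIn]
  · simp only [hmem, if_neg, candidatesOf, List.map_cons, List.cons_append, firstIn,
      not_false_eq_true]
    rcases rfind_go_spec s.toList s.toList.length with ⟨h1, h2⟩ | ⟨i, h1, h2, h3, h4⟩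
    · rw [pyParent_none s h1, A_none]
      have hnd : '.' ∉ s.toList := by
        intro hmem'
        rcases List.getElem_of_mem hmem' with ⟨k, hk, hkeq⟩
        exact h2 k (by omega) (by rw [List.getElem?_eq_getElem hk, hkeq])
      rw [dotPositions_nil _ hnd]
      simp
    · have hilt : i < s.toList.length := getElem?_dot_lt _ _ h3
      rw [pyParent_some s i hilt h1]
      rw [hrec (String.ofList (s.toList.take i))
        (by simp only [String.toList_ofList, List.length_take]; omega)]
      rw [cand_tail s.toList paramId.toList i hilt h3 (fun k hk1 hk2 => h4 k hk1 hk2)]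

theorem A_some (paramId : String) (ids : List String) :
    ∀ (n : Nat) (s : String), s.toList.length ≤ n →
      findAbsoluteParameter (some s) paramId ids
        = firstIn (candidatesOf (some s) paramId.toList) ids := by
  intro n
  induction n with
  | zero =>
    intro s hs
    exact A_some_step paramId ids s (fun t ht => absurd (lt_of_lt_of_le ht hs) (Nat.not_lt_zero _))
  | succ n ih =>
    intro s hs
    exact A_some_step paramId ids s (fun t ht => ih t (by omega))

-- ===== VERDICT (by name: the statement is the Claim_ definition above) =====
theorem findAbsoluteParameter_spec : Claim_equal_findAbsoluteParameter := by
  intro contextId paramId ids _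
  unfold Spec_findAbsoluteParameter findAbsoluteParameter_alt
  cases contextId with
  | none =>
    rw [A_none]
    simp [candidatesOf]
  | some s => exact A_some paramId ids s.toList.length s le_rfl
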